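-- pv_equiv track=rewrite | github.com/ste93/congestion-coverage-plan | src/congestion_coverage_plan/hamiltonian_path/hamiltonian_path.py | convert_mst_matrix_to_full_tsp_matrix
-- ===== SOURCE A (Python) =====
-- def convert_mst_matrix_to_full_tsp_matrix(vertices_ids, mst_matrix, initial_vertex_index, value_for_not_existent_edge=9999999999999999):
--     matrix = []
--
--     for row_id in range(0, len(mst_matrix) + 1):
--         row = []
--         for column_id in range(0, len(mst_matrix) + 1):
--             if row_id == column_id:
--                 row.append(0)
--             elif row_id == 0:
--                 if column_id == initial_vertex_index:
--                     row.append(0)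
--                 elif column_id != initial_vertex_index:
--                     row.append(value_for_not_existent_edge)
--             elif column_id == 0:
--                 if row_id == initial_vertex_index:
--                     row.append(value_for_not_existent_edge)
--                 elif row_id != initial_vertex_index:
--                     row.append(0)
--             else:
--                 row.append(mst_matrix[row_id - 1][column_id - 1])
--         matrix.append(row)
--     return matrix
-- ===== SOURCE B (Python) =====
-- def convert_mst_matrix_to_full_tsp_matrix(vertices_ids, mst_matrix, initial_vertex_index, value_for_not_existent_edge=9999999999999999):
--     n = len(mst_matrix)
--     matrix = [[0 if j == 0 or j == initial_vertex_index else value_for_not_existent_edge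
--                for j in range(n + 1)]]
--     for i, r in enumerate(mst_matrix, start=1):
--         first = value_for_not_existent_edge if i == initial_vertex_index else 0
--         matrix.append([first] + r[:i - 1] + [0] + r[i:n])
--     return matrix
-- ===== Notes on version B (the rewrite author's own statement) =====
-- stated objective: simpler
-- what changed: B builds the matrix in structural blocks (row 0 as one comprehension; each later row by splicing the MST row around a forced diagonal 0 and a prepended first-column value) instead of A's nested per-cell branch cascade over an (n+1)x(n+1) index grid.
import Mathlib
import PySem

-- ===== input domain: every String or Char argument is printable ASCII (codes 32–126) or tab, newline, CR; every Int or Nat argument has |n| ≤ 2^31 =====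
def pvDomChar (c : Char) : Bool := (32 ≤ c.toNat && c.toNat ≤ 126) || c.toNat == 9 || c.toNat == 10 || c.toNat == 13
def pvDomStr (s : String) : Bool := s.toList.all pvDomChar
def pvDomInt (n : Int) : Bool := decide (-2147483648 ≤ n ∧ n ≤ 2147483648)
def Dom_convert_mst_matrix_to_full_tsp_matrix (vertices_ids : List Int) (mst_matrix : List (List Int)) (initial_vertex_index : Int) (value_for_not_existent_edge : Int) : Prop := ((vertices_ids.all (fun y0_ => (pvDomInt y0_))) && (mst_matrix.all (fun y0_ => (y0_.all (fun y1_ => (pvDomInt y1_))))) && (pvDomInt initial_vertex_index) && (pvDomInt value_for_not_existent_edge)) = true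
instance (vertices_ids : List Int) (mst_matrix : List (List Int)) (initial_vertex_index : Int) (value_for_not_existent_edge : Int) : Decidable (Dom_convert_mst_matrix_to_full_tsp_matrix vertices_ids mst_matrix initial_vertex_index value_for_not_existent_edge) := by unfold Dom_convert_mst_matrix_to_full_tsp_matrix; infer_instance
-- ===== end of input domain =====

-- ===== PORT A =====

-- B builds the matrix in structural blocks (row 0 as one comprehension, each later row by
-- splicing the MST row around a forced diagonal 0) instead of A's per-cell branch cascade;
-- objective: simpler. Equality of RETURN values is claimed on Pre_ (= exactly the inputs
-- where A's indexing mst_matrix[row_id-1][column_id-1] never raises IndexError).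

-- ===== PORT A =====
-- literal transliteration of A: two nested for-loops over range(0, len(mst_matrix)+1),
-- appending one cell per iteration.  mst_matrix[row_id-1][column_id-1] is ported with
-- PySem.List.pyGet?; the '.getD' defaults are never reached on Pre_ (indices in range).
-- (Python's final 'elif column_id != initial_vertex_index' is the exhaustive complement
-- of the branch before it, so it is the plain 'else' here.)
def convert_mst_matrix_to_full_tsp_matrix (vertices_ids : List Int) (mst_matrix : List (List Int)) (initial_vertex_index : Int) (value_for_not_existent_edge : Int) : List (List Int) :=
  (PySem.List.pyRange 0 ((mst_matrix.length : Int) + 1) 1).foldl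
    (fun matrix row_id =>
      matrix ++ [(PySem.List.pyRange 0 ((mst_matrix.length : Int) + 1) 1).foldl
        (fun row column_id =>
          if row_id = column_id then row ++ [0]
          else if row_id = 0 then
            (if column_id = initial_vertex_index then row ++ [0]
             else row ++ [value_for_not_existent_edge])
          else if column_id = 0 then
            (if row_id = initial_vertex_index then row ++ [value_for_not_existent_edge]
             else row ++ [0])
          else
            row ++ [(PySem.List.pyGet? ((PySem.List.pyGet? mst_matrix (row_id - 1)).getD [])
                       (column_id - 1)).getD 0])
        []]) []

-- ===== PORT B =====
-- literal transliteration of Source B: row 0 as a comprehension over range(n+1), then for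
-- (i, r) in enumerate(mst_matrix, start=1) the row [first] + r[:i-1] + [0] + r[i:n].
def convert_mst_matrix_to_full_tsp_matrix_alt (vertices_ids : List Int) (mst_matrix : List (List Int)) (initial_vertex_index : Int) (value_for_not_existent_edge : Int) : List (List Int) :=
  let n := mst_matrix.length
  let row0 := (PySem.List.pyRange 0 ((n : Int) + 1) 1).map
    (fun j => if j = 0 ∨ j = initial_vertex_index then 0 else value_for_not_existent_edge)
  row0 :: (PySem.List.enumerate mst_matrix 1).map
    (fun p =>
      [if p.1 = initial_vertex_index then value_for_not_existent_edge else 0] ++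
        PySem.List.slice p.2 none (some (p.1 - 1)) ++ [0] ++
        PySem.List.slice p.2 (some p.1) (some (n : Int)))

-- ===== PRECONDITION & SPEC =====
-- Pre_ admits exactly the inputs on which A returns: row k (0-based) of mst_matrix must be
-- long enough for every interior read mst_matrix[k][j-1], j-1 ∈ {0..n-1}\{k}; the last row
-- may be one shorter because its largest column index n-1 is the (skipped) diagonal.
def Pre_convert_mst_matrix_to_full_tsp_matrix (vertices_ids : List Int) (mst_matrix : List (List Int)) (initial_vertex_index : Int) (value_for_not_existent_edge : Int) : Prop :=
  ∀ k, (h : k < mst_matrix.length) →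
    (if k + 1 = mst_matrix.length then mst_matrix.length - 1 else mst_matrix.length)
      ≤ (mst_matrix[k]'h).length
instance (vertices_ids : List Int) (mst_matrix : List (List Int)) (initial_vertex_index : Int) (value_for_not_existent_edge : Int) : Decidable (Pre_convert_mst_matrix_to_full_tsp_matrix vertices_ids mst_matrix initial_vertex_index value_for_not_existent_edge) := by unfold Pre_convert_mst_matrix_to_full_tsp_matrix; infer_instance
def pvWitness_convert_mst_matrix_to_full_tsp_matrix : List Int × List (List Int) × Int × Int :=
  ([1, 2], [[0, 5], [5, 0]], 1, 99)

def Spec_convert_mst_matrix_to_full_tsp_matrix (vertices_ids : List Int) (mst_matrix : List (List Int)) (initial_vertex_index : Int) (value_for_not_existent_edge : Int) (out : List (List Int)) : Prop := out = convert_mst_matrix_to_full_tsp_matrix_alt vertices_ids mst_matrix initial_vertex_index value_for_not_existent_edge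
instance (vertices_ids : List Int) (mst_matrix : List (List Int)) (initial_vertex_index : Int) (value_for_not_existent_edge : Int) (out : List (List Int)) : Decidable (Spec_convert_mst_matrix_to_full_tsp_matrix vertices_ids mst_matrix initial_vertex_index value_for_not_existent_edge out) := by unfold Spec_convert_mst_matrix_to_full_tsp_matrix; infer_instance

-- ===== CLAIM (what is proved, stated in full; the proofs are below) =====
def Claim_equal_convert_mst_matrix_to_full_tsp_matrix : Prop := ∀ (vertices_ids : List Int) (mst_matrix : List (List Int)) (initial_vertex_index : Int) (value_for_not_existent_edge : Int), Dom_convert_mst_matrix_to_full_tsp_matrix vertices_ids mst_matrix initial_vertex_index value_for_not_existent_edge → Pre_convert_mst_matrix_to_full_tsp_matrix vertices_ids mst_matrix initial_vertex_index value_for_not_existent_edge → Spec_convert_mst_matrix_to_full_tsp_matrix vertices_ids mst_matrix initial_vertex_index value_for_not_existent_edge (convert_mst_matrix_to_full_tsp_matrix vertices_ids mst_matrix initial_vertex_index value_for_not_existent_edge)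
-- ===== LEMMAS AND PROOFS =====

-- the per-cell value of A's inner loop body
def pvCellA (mst_matrix : List (List Int)) (iv v : Int) (i j : Int) : Int :=
  if i = j then 0
  else if i = 0 then (if j = iv then 0 else v)
  else if j = 0 then (if i = iv then v else 0)
  else (PySem.List.pyGet? ((PySem.List.pyGet? mst_matrix (i - 1)).getD []) (j - 1)).getD 0

theorem pvA_eq_map (vertices_ids : List Int) (mst_matrix : List (List Int)) (iv v : Int) :
    convert_mst_matrix_to_full_tsp_matrix vertices_ids mst_matrix iv v =
      (PySem.List.pyRange 0 ((mst_matrix.length : Int) + 1) 1).map (fun i =>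
        (PySem.List.pyRange 0 ((mst_matrix.length : Int) + 1) 1).map (pvCellA mst_matrix iv v i)) := by
  unfold convert_mst_matrix_to_full_tsp_matrix
  have hinner : ∀ i : Int,
      (PySem.List.pyRange 0 ((mst_matrix.length : Int) + 1) 1).foldl
        (fun row column_id =>
          if i = column_id then row ++ [0]
          else if i = 0 then
            (if column_id = iv then row ++ [0] else row ++ [v])
          else if column_id = 0 then
            (if i = iv then row ++ [v] else row ++ [0])
          else
            row ++ [(PySem.List.pyGet? ((PySem.List.pyGet? mst_matrix (i - 1)).getD [])
                       (column_id - 1)).getD 0]) [] =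
      (PySem.List.pyRange 0 ((mst_matrix.length : Int) + 1) 1).map (pvCellA mst_matrix iv v i) := by
    intro i
    have h := PySem.List.foldl_append_singleton_eq_map (pvCellA mst_matrix iv v i)
      (PySem.List.pyRange 0 ((mst_matrix.length : Int) + 1) 1) []
    rw [List.nil_append] at h
    rw [← h]
    congr 1
    funext row c
    simp only [pvCellA]
    split_ifs <;> rfl
  calc _ = (PySem.List.pyRange 0 ((mst_matrix.length : Int) + 1) 1).foldl
        (fun matrix i => matrix ++ [(PySem.List.pyRange 0 ((mst_matrix.length : Int) + 1) 1).map (pvCellA mst_matrix iv v i)]) [] := by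
        congr 1
        funext matrix i
        rw [hinner]
    _ = _ := by
        have h := PySem.List.foldl_append_singleton_eq_map
          (fun i => (PySem.List.pyRange 0 ((mst_matrix.length : Int) + 1) 1).map (pvCellA mst_matrix iv v i))
          (PySem.List.pyRange 0 ((mst_matrix.length : Int) + 1) 1) []
        rw [List.nil_append] at h
        exact h


theorem pvMain (vertices_ids : List Int) (mst_matrix : List (List Int)) (iv v : Int)
    (hpre : Pre_convert_mst_matrix_to_full_tsp_matrix vertices_ids mst_matrix iv v) :
    convert_mst_matrix_to_full_tsp_matrix vertices_ids mst_matrix iv v =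
      convert_mst_matrix_to_full_tsp_matrix_alt vertices_ids mst_matrix iv v := by
  rw [pvA_eq_map]
  unfold convert_mst_matrix_to_full_tsp_matrix_alt
  dsimp only []
  apply List.ext_getElem
  · simp only [List.length_map, PySem.List.length_pyRange_one, List.length_cons,
      PySem.List.length_enumerate]
    omega
  · intro k h1 h2
    rw [List.getElem_map, PySem.List.getElem_pyRange_one]
    have hk : k < mst_matrix.length + 1 := by
      simp only [List.length_map, PySem.List.length_pyRange_one] at h1; omega
    match k, hk with
    | 0, _ =>
      simp only [Nat.cast_zero, add_zero, List.getElem_cons_zero]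
      apply List.map_congr_left
      intro jj hj
      obtain ⟨hj0, hjn⟩ := PySem.List.mem_pyRange_one.mp hj
      simp only [pvCellA]
      by_cases hz : jj = 0
      · simp [hz]
      · simp [hz, Ne.symm hz]
    | k' + 1, hk =>
      have hk' : k' < mst_matrix.length := by omega
      simp only [List.getElem_cons_succ, List.getElem_map,
        PySem.List.getElem_enumerate]
      set r := mst_matrix[k']'hk' with hr
      have hlen := hpre k' hk'
      rw [← hr] at hlen
      have hs1 : PySem.List.slice r none (some (1 + (k' : Int) - 1)) = r.take k' := by
        have he : (1 + (k' : Int) - 1) = ((k' : Nat) : Int) := by omega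
        rw [he, PySem.List.slice_to_natCast]
      have hs2 : PySem.List.slice r (some (1 + (k' : Int))) (some ((mst_matrix.length : Nat) : Int)) =
          (r.drop (k' + 1)).take (mst_matrix.length - (k' + 1)) := by
        have he : (1 + (k' : Int)) = (((k' + 1 : Nat)) : Int) := by push_cast [Nat.cast_add]; ring
        rw [he]
        have h2 := PySem.List.slice_natCast r (k' + 1) mst_matrix.length
        rw [h2]
      simp only [hs1, hs2, List.append_assoc, List.cons_append, List.nil_append]
      apply List.ext_getElem
      · simp only [List.length_map, PySem.List.length_pyRange_one, List.length_cons,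
          List.length_append, List.length_take, List.length_drop]
        split_ifs at hlen <;> omega
      · intro j hj1 hj2
        rw [List.getElem_map, PySem.List.getElem_pyRange_one]
        have hjn : j < mst_matrix.length + 1 := by
          simp only [List.length_map, PySem.List.length_pyRange_one] at hj1; omega
        have hrlen : mst_matrix.length - 1 ≤ r.length := by split_ifs at hlen <;> omega
        have hrlen2 : k' + 1 ≠ mst_matrix.length → mst_matrix.length ≤ r.length := by
          intro h; split_ifs at hlen <;> omega
        have hkr : k' ≤ r.length := by omega
        match j, hjn with
        | 0, _ =>
          simp only [Nat.cast_zero, add_zero, Nat.cast_add, Nat.cast_one, zero_add,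
            List.getElem_cons_zero, pvCellA]
          have hne : ¬ ((k' : Int) + 1 = 0) := by omega
          have hne2 : (1 : Int) + (k' : Int) = (k' : Int) + 1 := by ring
          rw [hne2]
          simp [hne]
        | j' + 1, hjn' =>
          have hj'n : j' < mst_matrix.length := by omega
          simp only [Nat.cast_add, Nat.cast_one, zero_add, List.getElem_cons_succ, pvCellA]
          by_cases hd : j' = k'
          · -- the forced diagonal cell
            subst hd
            rw [if_pos rfl]
            have htk : (List.take j' r).length = j' := by
              simp [List.length_take]; omega
            rw [List.getElem_append_right (show (List.take j' r).length ≤ j' by omega)]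
            simp [htk]
          · -- an interior MST cell
            have hne1 : ¬ ((k' : Int) + 1 = (j' : Int) + 1) := by
              intro h; apply hd; omega
            have hne2 : ¬ ((k' : Int) + 1 = 0) := by omega
            have hne3 : ¬ ((j' : Int) + 1 = 0) := by omega
            rw [if_neg hne1, if_neg hne2, if_neg hne3]
            have hc1 : (k' : Int) + 1 - 1 = ((k' : Nat) : Int) := by ring
            have hc2 : (j' : Int) + 1 - 1 = ((j' : Nat) : Int) := by ring
            rw [hc1, hc2, PySem.List.pyGet?_natCast, PySem.List.pyGet?_natCast]
            rw [List.getElem?_eq_getElem hk']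
            simp only [Option.getD_some, ← hr]
            have hjr : j' < r.length := by
              by_cases h : k' + 1 = mst_matrix.length
              · omega
              · have := hrlen2 h; omega
            rw [List.getElem?_eq_getElem hjr, Option.getD_some]
            have htk : (List.take k' r).length = k' := by
              simp [List.length_take]; omega
            by_cases hlt : j' < k'
            · rw [List.getElem_append_left (by simpa [htk] using hlt)]
              rw [List.getElem_take]
            · rw [List.getElem_append_right (show (List.take k' r).length ≤ j' by omega)]
              have hsucc : j' - (List.take k' r).length = (j' - k' - 1) + 1 := by
                rw [htk]; omega
              rw [getElem_congr rfl hsucc (by simp only [List.length_cons, List.length_take, List.length_drop]; omega)]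
              rw [List.getElem_cons_succ]
              rw [List.getElem_take, List.getElem_drop]
              exact getElem_congr rfl (by omega) (by omega)

-- ===== VERDICT (by name: the statement is the Claim_ definition above) =====
theorem convert_mst_matrix_to_full_tsp_matrix_spec : Claim_equal_convert_mst_matrix_to_full_tsp_matrix := by
  intro vs mst iv v _hdom hpre
  exact pvMain vs mst iv v hpre
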